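-- pv_equiv track=rewrite | github.com/imrnh/system_project_api | music/fingerprint.py | get_range_max
-- ===== SOURCE A (Python) =====
-- from types import SimpleNamespace
--
-- audio_config = SimpleNamespace(
--     base_path="assets/audio",
--     sr=44100,
--     mono=True,
--     block_size=50,  # in ms
--     block_ranges=[0, 1, 40, 80, 120, 160, 200],
--     hash_bit_length=4,
-- )
--
-- def get_range_max(audio_blocks):
--     positive_range = audio_config.block_ranges
--
--     prv_matrix = []
--
--     for ab_idx, audio_block in enumerate(audio_blocks):
--         # creating an array with length 12 and all element filled with -1
--         positive_range_values = [-1] * len(positive_range)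
--         for sv in audio_block:
--             for idx, pr in enumerate(positive_range):
--                 if (idx + 1) < len(positive_range):
--                     min_lim_for_sv = positive_range[idx + 1]
--                 else:
--                     # a random maximum range to allow 250 to infinity in the last container.
--                     min_lim_for_sv = 1e9
--                 if (sv > pr) and (sv < min_lim_for_sv):
--                     if positive_range_values[idx] < pr:
--                         positive_range_values[idx] = sv
--
--         prv_matrix.append(positive_range_values)
--     return prv_matrix
-- ===== SOURCE B (Python) =====
-- BLOCK_RANGES = [0, 1, 40, 80, 120, 160, 200]
--
-- def get_range_max(audio_blocks):
--     # Per bucket, return the FIRST sample strictly inside (lower, upper); -1 if none.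
--     block_ranges = BLOCK_RANGES
--     prv_matrix = []
--     for audio_block in audio_blocks:
--         row = []
--         for idx in range(len(block_ranges)):
--             lower = block_ranges[idx]
--             upper = block_ranges[idx + 1] if idx + 1 < len(block_ranges) else 1e9
--             row.append(next((sv for sv in audio_block if lower < sv < upper), -1))
--         prv_matrix.append(row)
--     return prv_matrix
-- ===== Notes on version B (the rewrite author's own statement) =====
-- stated objective: simpler
-- what changed: A fills a mutable 7-slot row by iterating samples outermost and scanning all range buckets per sample with a first-write guard; B iterates buckets outermost and takes the first sample strictly inside each (lower, upper) via an early-exit scan, with no mutable row or write guard.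
import Mathlib
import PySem

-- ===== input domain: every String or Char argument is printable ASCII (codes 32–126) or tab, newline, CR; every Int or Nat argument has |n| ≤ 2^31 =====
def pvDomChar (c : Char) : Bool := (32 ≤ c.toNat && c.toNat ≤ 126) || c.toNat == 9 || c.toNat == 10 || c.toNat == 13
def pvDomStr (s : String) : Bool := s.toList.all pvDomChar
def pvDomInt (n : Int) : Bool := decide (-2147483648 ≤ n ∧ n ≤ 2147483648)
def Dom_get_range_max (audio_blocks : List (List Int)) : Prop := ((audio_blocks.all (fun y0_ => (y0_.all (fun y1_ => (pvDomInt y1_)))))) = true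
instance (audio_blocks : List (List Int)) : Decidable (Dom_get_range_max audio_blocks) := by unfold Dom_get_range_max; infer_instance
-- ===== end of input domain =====

-- B replaces A's sample-outer fill pass over a mutable 7-slot row by a bucket-outer
-- first-match scan per range bucket (objective: simpler).

-- audio_config.block_ranges
def pvRanges : List Int := [0, 1, 40, 80, 120, 160, 200]

-- ===== PORT A =====
-- Python's 1e9 sentinel is written as the integer 1000000000: the comparison sv < 1e9
-- is exact for the integer samples admitted here.
def get_range_max (audio_blocks : List (List Int)) : List (List Int) :=
  audio_blocks.foldl (fun prv_matrix audio_block =>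
    let positive_range_values : List Int := List.replicate pvRanges.length (-1)
    let vals := audio_block.foldl (fun vals sv =>
      pvRanges.zipIdx.foldl (fun vals prIdx =>
        let pr := prIdx.1
        let idx := prIdx.2
        let min_lim_for_sv : Int :=
          if idx + 1 < pvRanges.length then pvRanges.getD (idx + 1) 0 else 1000000000
        if sv > pr ∧ sv < min_lim_for_sv then
          if vals.getD idx 0 < pr then vals.set idx sv else vals
        else vals) vals) positive_range_values
    prv_matrix ++ [vals]) []

-- ===== PORT B =====
def get_range_max_alt (audio_blocks : List (List Int)) : List (List Int) :=
  audio_blocks.map (fun audio_block =>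
    (List.range pvRanges.length).map (fun idx =>
      let lower := pvRanges.getD idx 0
      let upper : Int :=
        if idx + 1 < pvRanges.length then pvRanges.getD (idx + 1) 0 else 1000000000
      (audio_block.find? (fun sv => lower < sv && sv < upper)).getD (-1)))

-- ===== PRECONDITION & SPEC =====
def Spec_get_range_max (audio_blocks : List (List Int)) (out : List (List Int)) : Prop := out = get_range_max_alt audio_blocks
instance (audio_blocks : List (List Int)) (out : List (List Int)) : Decidable (Spec_get_range_max audio_blocks out) := by unfold Spec_get_range_max; infer_instance

-- ===== CLAIM (what is proved, stated in full; the proofs are below) =====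
def Claim_equal_get_range_max : Prop := ∀ (audio_blocks : List (List Int)), Dom_get_range_max audio_blocks → Spec_get_range_max audio_blocks (get_range_max audio_blocks)

-- ===== LEMMAS AND PROOFS =====

-- the effect of one sample on one slot of A's row
def pvSlot (pr up : Int) (v sv : Int) : Int :=
  if sv > pr ∧ sv < up then (if v < pr then sv else v) else v

-- the body of A's innermost loop, as a named function (definitionally the port's lambda)
def pvStepFn (sv : Int) (vals : List Int) (prIdx : Int × Nat) : List Int :=
  let pr := prIdx.1
  let idx := prIdx.2
  let min_lim_for_sv : Int :=
    if idx + 1 < pvRanges.length then pvRanges.getD (idx + 1) 0 else 1000000000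
  if sv > pr ∧ sv < min_lim_for_sv then
    if vals.getD idx 0 < pr then vals.set idx sv else vals
  else vals

theorem pvStepAt0 (sv a b c d e f g : Int) :
    pvStepFn sv [a, b, c, d, e, f, g] (0, 0) = [pvSlot 0 1 a sv, b, c, d, e, f, g] := by
  unfold pvStepFn pvSlot; norm_num [pvRanges]; split_ifs <;> rfl

theorem pvStepAt1 (sv a b c d e f g : Int) :
    pvStepFn sv [a, b, c, d, e, f, g] (1, 1) = [a, pvSlot 1 40 b sv, c, d, e, f, g] := by
  unfold pvStepFn pvSlot; norm_num [pvRanges]; split_ifs <;> rfl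

theorem pvStepAt2 (sv a b c d e f g : Int) :
    pvStepFn sv [a, b, c, d, e, f, g] (40, 2) = [a, b, pvSlot 40 80 c sv, d, e, f, g] := by
  unfold pvStepFn pvSlot; norm_num [pvRanges]; split_ifs <;> rfl

theorem pvStepAt3 (sv a b c d e f g : Int) :
    pvStepFn sv [a, b, c, d, e, f, g] (80, 3) = [a, b, c, pvSlot 80 120 d sv, e, f, g] := by
  unfold pvStepFn pvSlot; norm_num [pvRanges]; split_ifs <;> rfl

theorem pvStepAt4 (sv a b c d e f g : Int) :
    pvStepFn sv [a, b, c, d, e, f, g] (120, 4) = [a, b, c, d, pvSlot 120 160 e sv, f, g] := by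
  unfold pvStepFn pvSlot; norm_num [pvRanges]; split_ifs <;> rfl

theorem pvStepAt5 (sv a b c d e f g : Int) :
    pvStepFn sv [a, b, c, d, e, f, g] (160, 5) = [a, b, c, d, e, pvSlot 160 200 f sv, g] := by
  unfold pvStepFn pvSlot; norm_num [pvRanges]; split_ifs <;> rfl

theorem pvStepAt6 (sv a b c d e f g : Int) :
    pvStepFn sv [a, b, c, d, e, f, g] (200, 6) = [a, b, c, d, e, f, pvSlot 200 1000000000 g sv] := by
  unfold pvStepFn pvSlot; norm_num [pvRanges]; split_ifs <;> rfl

-- one sample's pass over the 7 enumerated ranges, componentwise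
theorem pvStep7 (sv a b c d e f g : Int) :
    pvRanges.zipIdx.foldl (fun vals prIdx =>
        let pr := prIdx.1
        let idx := prIdx.2
        let min_lim_for_sv : Int :=
          if idx + 1 < pvRanges.length then pvRanges.getD (idx + 1) 0 else 1000000000
        if sv > pr ∧ sv < min_lim_for_sv then
          if vals.getD idx 0 < pr then vals.set idx sv else vals
        else vals) [a, b, c, d, e, f, g]
    = [pvSlot 0 1 a sv, pvSlot 1 40 b sv, pvSlot 40 80 c sv, pvSlot 80 120 d sv,
       pvSlot 120 160 e sv, pvSlot 160 200 f sv, pvSlot 200 1000000000 g sv] := by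
  show pvStepFn sv (pvStepFn sv (pvStepFn sv (pvStepFn sv (pvStepFn sv (pvStepFn sv (pvStepFn sv
      [a, b, c, d, e, f, g] ((0 : Int), (0 : Nat))) (1, 1)) (40, 2)) (80, 3)) (120, 4)) (160, 5)) (200, 6) = _
  rw [pvStepAt0, pvStepAt1, pvStepAt2, pvStepAt3, pvStepAt4, pvStepAt5, pvStepAt6]

theorem pvSlotFold_stay (pr up v : Int) (block : List Int) (h : ¬ v < pr) :
    block.foldl (pvSlot pr up) v = v := by
  induction block with
  | nil => rfl
  | cons sv bs ih =>
    simp only [List.foldl, pvSlot]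
    split_ifs <;> [exact ih; exact ih]

theorem pvSlotFold_find (pr up : Int) (hpr : -1 < pr) (block : List Int) :
    block.foldl (pvSlot pr up) (-1) =
      (block.find? (fun sv => pr < sv && sv < up)).getD (-1) := by
  induction block with
  | nil => rfl
  | cons sv bs ih =>
    by_cases h : pr < sv ∧ sv < up
    · have h1 : pvSlot pr up (-1) sv = sv := by
        simp [pvSlot, h.1, h.2, hpr]
      simp only [List.foldl, h1, List.find?]
      have : (pr < sv && sv < up) = true := by simp [h.1, h.2]
      rw [this]
      simp [pvSlotFold_stay pr up sv bs (by omega)]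
    · have h1 : pvSlot pr up (-1) sv = -1 := by
        simp only [pvSlot]
        split_ifs with hc
        · exact absurd ⟨hc.1, hc.2⟩ h
        · rfl
      simp only [List.foldl, h1, List.find?]
      have : (pr < sv && sv < up) = false := by
        simp only [Bool.and_eq_false_iff, decide_eq_false_iff_not]
        omega
      rw [this]
      exact ih

-- A's inner sample loop, componentwise on a 7-slot row
theorem pvInner7 (block : List Int) : ∀ (a b c d e f g : Int),
    block.foldl (fun vals sv =>
      pvRanges.zipIdx.foldl (fun vals prIdx =>
        let pr := prIdx.1
        let idx := prIdx.2
        let min_lim_for_sv : Int :=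
          if idx + 1 < pvRanges.length then pvRanges.getD (idx + 1) 0 else 1000000000
        if sv > pr ∧ sv < min_lim_for_sv then
          if vals.getD idx 0 < pr then vals.set idx sv else vals
        else vals) vals) [a, b, c, d, e, f, g]
    = [block.foldl (pvSlot 0 1) a, block.foldl (pvSlot 1 40) b, block.foldl (pvSlot 40 80) c,
       block.foldl (pvSlot 80 120) d, block.foldl (pvSlot 120 160) e,
       block.foldl (pvSlot 160 200) f, block.foldl (pvSlot 200 1000000000) g] := by
  induction block with
  | nil => intro a b c d e f g; rfl
  | cons sv bs ih =>
    intro a b c d e f g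
    simp only [List.foldl]
    rw [pvStep7]
    exact ih _ _ _ _ _ _ _

theorem pvRow_eq (block : List Int) :
    block.foldl (fun vals sv =>
      pvRanges.zipIdx.foldl (fun vals prIdx =>
        let pr := prIdx.1
        let idx := prIdx.2
        let min_lim_for_sv : Int :=
          if idx + 1 < pvRanges.length then pvRanges.getD (idx + 1) 0 else 1000000000
        if sv > pr ∧ sv < min_lim_for_sv then
          if vals.getD idx 0 < pr then vals.set idx sv else vals
        else vals) vals) (List.replicate pvRanges.length (-1))
    = (List.range pvRanges.length).map (fun idx =>
        let lower := pvRanges.getD idx 0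
        let upper : Int :=
          if idx + 1 < pvRanges.length then pvRanges.getD (idx + 1) 0 else 1000000000
        (block.find? (fun sv => lower < sv && sv < upper)).getD (-1)) := by
  have h : (List.replicate pvRanges.length (-1) : List Int)
      = [-1, -1, -1, -1, -1, -1, -1] := by rfl
  rw [h, pvInner7]
  rw [pvSlotFold_find 0 1 (by norm_num), pvSlotFold_find 1 40 (by norm_num),
    pvSlotFold_find 40 80 (by norm_num), pvSlotFold_find 80 120 (by norm_num),
    pvSlotFold_find 120 160 (by norm_num), pvSlotFold_find 160 200 (by norm_num),
    pvSlotFold_find 200 1000000000 (by norm_num)]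
  rfl

theorem pvFoldl_append_map {α β : Type} (f : α → β) (xs : List α) : ∀ (acc : List β),
    xs.foldl (fun acc x => acc ++ [f x]) acc = acc ++ xs.map f := by
  induction xs with
  | nil => intro acc; simp
  | cons x xs ih => intro acc; simp [List.foldl, ih]

-- ===== VERDICT (by name: the statement is the Claim_ definition above) =====
theorem get_range_max_spec : Claim_equal_get_range_max := by
  intro audio_blocks _
  unfold Spec_get_range_max get_range_max get_range_max_alt
  have := pvFoldl_append_map (f := fun audio_block =>
    audio_block.foldl (fun vals sv =>
      pvRanges.zipIdx.foldl (fun vals prIdx =>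
        let pr := prIdx.1
        let idx := prIdx.2
        let min_lim_for_sv : Int :=
          if idx + 1 < pvRanges.length then pvRanges.getD (idx + 1) 0 else 1000000000
        if sv > pr ∧ sv < min_lim_for_sv then
          if vals.getD idx 0 < pr then vals.set idx sv else vals
        else vals) vals) (List.replicate pvRanges.length (-1))) audio_blocks []
  simp only [List.nil_append] at this
  rw [this]
  congr 1
  funext block
  exact pvRow_eq block
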